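-- pv_equiv track=rewrite | github.com/Nummersechs/OW_Wheelpicker | owpicker_mvc/controller/ocr/pipeline/importer.py | _parse_easyocr_langs
-- ===== SOURCE A (Python) =====
-- _EASYOCR_LANG_ALIAS: dict[str, str] = {
--     "eng": "en",
--     "en": "en",
--     "deu": "de",
--     "ger": "de",
--     "german": "de",
--     "deutsch": "de",
--     "de": "de",
--     "ja": "ja",
--     "jpn": "ja",
--     "jp": "ja",
--     "japanese": "ja",
--     "ko": "ko",
--     "kor": "ko",
--     "kr": "ko",
--     "korean": "ko",
--     "zh": "ch_sim",
--     "zho": "ch_sim",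
--     "chi": "ch_sim",
--     "cn": "ch_sim",
--     "ch": "ch_sim",
--     "chs": "ch_sim",
--     "zh-cn": "ch_sim",
--     "zh_hans": "ch_sim",
--     "ch_sim": "ch_sim",
--     "cht": "ch_tra",
--     "zh-tw": "ch_tra",
--     "zh-hk": "ch_tra",
--     "zh_hant": "ch_tra",
--     "ch_tra": "ch_tra",
-- }
--
-- def _parse_ocr_lang_tokens(value: str | None) -> list[str]:
--     raw = str(value or "").strip()
--     if not raw:
--         return []
--     normalized = raw.replace("+", ",").replace(";", ",")
--     tokens = [token.strip() for token in normalized.split(",") if token.strip()]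
--     seen: set[str] = set()
--     result: list[str] = []
--     for token in tokens:
--         key = token.lower()
--         if key in seen:
--             continue
--         seen.add(key)
--         result.append(token)
--     return result
--
-- def _parse_easyocr_langs(lang: str | None) -> tuple[str, ...]:
--     raw_tokens = _parse_ocr_lang_tokens(lang)
--     if not raw_tokens:
--         return ("en",)
--     normalized: list[str] = []
--     seen: set[str] = set()
--     for token in raw_tokens:
--         key = token.lower()
--         mapped = _EASYOCR_LANG_ALIAS.get(key)
--         if mapped is None:
--             if len(key) == 2 and key.isalpha():
--                 mapped = key
--             else:
--                 continue
--         if mapped in seen: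
--             continue
--         seen.add(mapped)
--         normalized.append(mapped)
--     if not normalized:
--         return ("en",)
--     return tuple(normalized)
-- ===== SOURCE B (Python) =====
-- _EASYOCR_LANG_ALIAS = {
--     "eng": "en", "en": "en",
--     "deu": "de", "ger": "de", "german": "de", "deutsch": "de", "de": "de",
--     "ja": "ja", "jpn": "ja", "jp": "ja", "japanese": "ja",
--     "ko": "ko", "kor": "ko", "kr": "ko", "korean": "ko",
--     "zh": "ch_sim", "zho": "ch_sim", "chi": "ch_sim", "cn": "ch_sim",
--     "ch": "ch_sim", "chs": "ch_sim", "zh-cn": "ch_sim", "zh_hans": "ch_sim",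
--     "ch_sim": "ch_sim",
--     "cht": "ch_tra", "zh-tw": "ch_tra", "zh-hk": "ch_tra", "zh_hant": "ch_tra",
--     "ch_tra": "ch_tra",
-- }
--
-- def _parse_easyocr_langs(lang):
--     # One pass: no separate raw-token dedup (it is subsumed by dedup on mapped codes).
--     raw = str(lang or "").strip()
--     if not raw:
--         return ("en",)
--     seen = set()
--     result = []
--     for piece in raw.replace("+", ",").replace(";", ",").split(","):
--         token = piece.strip()
--         if not token:
--             continue
--         key = token.lower()
--         mapped = _EASYOCR_LANG_ALIAS.get(key)
--         if mapped is None: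
--             if len(key) == 2 and key.isalpha():
--                 mapped = key
--             else:
--                 continue
--         if mapped not in seen:
--             seen.add(mapped)
--             result.append(mapped)
--     return tuple(result) if result else ("en",)
-- ===== Notes on version B (the rewrite author's own statement) =====
-- stated objective: simpler
-- what changed: Inlined the helper and collapsed A's three passes (tokenize, dedup raw tokens by lowercase key, map+dedup by mapped code) into one loop over the split pieces with a single seen-set keyed by the mapped code; the raw-token dedup pass is dropped as redundant.
import Mathlib
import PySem

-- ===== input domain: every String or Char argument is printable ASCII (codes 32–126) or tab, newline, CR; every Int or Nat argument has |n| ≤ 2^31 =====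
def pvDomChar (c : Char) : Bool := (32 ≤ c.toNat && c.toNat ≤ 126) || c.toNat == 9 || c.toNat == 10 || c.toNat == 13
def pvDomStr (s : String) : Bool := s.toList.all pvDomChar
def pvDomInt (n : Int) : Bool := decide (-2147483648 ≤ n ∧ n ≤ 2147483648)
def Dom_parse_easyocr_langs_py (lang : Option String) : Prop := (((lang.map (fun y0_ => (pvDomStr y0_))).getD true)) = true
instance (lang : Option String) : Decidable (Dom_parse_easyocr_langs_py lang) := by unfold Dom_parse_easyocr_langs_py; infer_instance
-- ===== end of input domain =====

-- B inlines A's helper and collapses its three passes (tokenize, dedup raw tokens by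
-- lowercase key, map+dedup by mapped code) into one loop with a single seen-set keyed by
-- the mapped code; objective: simpler.


-- ===== PORT A =====
-- module-level alias table _EASYOCR_LANG_ALIAS
def pvAlias : PySem.Dict String String := PySem.Dict.ofList [
  ("eng", "en"), ("en", "en"),
  ("deu", "de"), ("ger", "de"), ("german", "de"), ("deutsch", "de"), ("de", "de"),
  ("ja", "ja"), ("jpn", "ja"), ("jp", "ja"), ("japanese", "ja"),
  ("ko", "ko"), ("kor", "ko"), ("kr", "ko"), ("korean", "ko"),
  ("zh", "ch_sim"), ("zho", "ch_sim"), ("chi", "ch_sim"), ("cn", "ch_sim"),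
  ("ch", "ch_sim"), ("chs", "ch_sim"), ("zh-cn", "ch_sim"), ("zh_hans", "ch_sim"),
  ("ch_sim", "ch_sim"),
  ("cht", "ch_tra"), ("zh-tw", "ch_tra"), ("zh-hk", "ch_tra"), ("zh_hant", "ch_tra"),
  ("ch_tra", "ch_tra")]

-- the alias lookup with the 2-letter fallback ('mapped' in both loop bodies)
def pvKm (key : String) : Option String :=
  match PySem.Dict.get? pvAlias key with
  | some m => some m
  | none => if PySem.Str.len key == 2 && PySem.Str.strIsalpha key then some key else none

-- body of the dedup loop in _parse_ocr_lang_tokens (state = (seen, result))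
def pvLoop1Step (st : PySem.Set String × List String) (token : String) :
    PySem.Set String × List String :=
  let key := PySem.Str.lower token
  if PySem.Set.contains st.1 key then st
  else (PySem.Set.add st.1 key, st.2 ++ [token])

-- helper _parse_ocr_lang_tokens; 'str(value or "")' on an Option String is value.getD ""
def parse_ocr_lang_tokens (value : Option String) : List String :=
  let raw := PySem.Str.strip (value.getD "")
  if raw = "" then []
  else
    let normalized := PySem.Str.replace (PySem.Str.replace raw "+" ",") ";" ","
    let tokens := (((PySem.Str.split? normalized ",").getD []).map PySem.Str.strip).filter
      (fun t => t ≠ "")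
    (tokens.foldl pvLoop1Step (PySem.Set.empty, [])).2

-- body of the mapping loop in _parse_easyocr_langs (state = (seen, normalized))
def pvLoop2Step (st : PySem.Set String × List String) (token : String) :
    PySem.Set String × List String :=
  let key := PySem.Str.lower token
  match pvKm key with
  | none => st
  | some m =>
      if PySem.Set.contains st.1 m then st
      else (PySem.Set.add st.1 m, st.2 ++ [m])

def parse_easyocr_langs_py (lang : Option String) : List String :=
  let raw_tokens := parse_ocr_lang_tokens lang
  if raw_tokens = [] then ["en"]
  else
    let normalized := (raw_tokens.foldl pvLoop2Step (PySem.Set.empty, [])).2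
    if normalized = [] then ["en"] else normalized

-- ===== PORT B =====
-- body of B's single loop over the raw comma-split pieces (state = (seen, result))
def pvLoopBStep (st : PySem.Set String × List String) (piece : String) :
    PySem.Set String × List String :=
  let token := PySem.Str.strip piece
  if token = "" then st
  else
    let key := PySem.Str.lower token
    match pvKm key with
    | none => st
    | some m =>
        if PySem.Set.contains st.1 m then st
        else (PySem.Set.add st.1 m, st.2 ++ [m])

def parse_easyocr_langs_py_alt (lang : Option String) : List String :=
  let raw := PySem.Str.strip (lang.getD "")
  if raw = "" then ["en"]
  else
    let pieces := (PySem.Str.split?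
      (PySem.Str.replace (PySem.Str.replace raw "+" ",") ";" ",") ",").getD []
    let result := (pieces.foldl pvLoopBStep (PySem.Set.empty, [])).2
    if result = [] then ["en"] else result

-- ===== PRECONDITION & SPEC =====
def Spec_parse_easyocr_langs_py (lang : Option String) (out : List String) : Prop := out = parse_easyocr_langs_py_alt lang
instance (lang : Option String) (out : List String) : Decidable (Spec_parse_easyocr_langs_py lang out) := by unfold Spec_parse_easyocr_langs_py; infer_instance

-- ===== CLAIM (what is proved, stated in full; the proofs are below) =====
def Claim_equal_parse_easyocr_langs_py : Prop := ∀ (lang : Option String), Dom_parse_easyocr_langs_py lang → Spec_parse_easyocr_langs_py lang (parse_easyocr_langs_py lang)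

-- ===== LEMMAS AND PROOFS =====

theorem pvLoop2Step_none (st : PySem.Set String × List String) (t : String)
    (hkm : pvKm (PySem.Str.lower t) = none) : pvLoop2Step st t = st := by
  simp [pvLoop2Step, hkm]

theorem pvLoop2Step_some (st : PySem.Set String × List String) (t m : String)
    (hkm : pvKm (PySem.Str.lower t) = some m) :
    pvLoop2Step st t =
      if PySem.Set.contains st.1 m then st
      else (PySem.Set.add st.1 m, st.2 ++ [m]) := by
  simp only [pvLoop2Step, hkm]

-- seen only grows
theorem pvLoop2Step_seen_mono (st : PySem.Set String × List String) (t x : String)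
    (hx : x ∈ st.1) : x ∈ (pvLoop2Step st t).1 := by
  cases hkm : pvKm (PySem.Str.lower t) with
  | none => rw [pvLoop2Step_none st t hkm]; exact hx
  | some m =>
      rw [pvLoop2Step_some st t m hkm]
      split
      · exact hx
      · exact (PySem.Set.mem_add _ _ _).mpr (Or.inl hx)

-- after a step on t, any mapped value of t's key is in seen
theorem pvLoop2Step_seen_self (st : PySem.Set String × List String) (t m : String)
    (hkm : pvKm (PySem.Str.lower t) = some m) : m ∈ (pvLoop2Step st t).1 := by
  rw [pvLoop2Step_some st t m hkm]
  split
  · next h => exact (PySem.Set.contains_iff _ _).mp h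
  · exact (PySem.Set.mem_add _ _ _).mpr (Or.inr rfl)

-- B's loop over the pieces = A's second loop over the stripped nonempty tokens
theorem loopB_eq_loop2 (pieces : List String) (st : PySem.Set String × List String) :
    pieces.foldl pvLoopBStep st =
      ((pieces.map PySem.Str.strip).filter (fun t => t ≠ "")).foldl pvLoop2Step st := by
  induction pieces generalizing st with
  | nil => rfl
  | cons p ps ih =>
      simp only [List.foldl_cons, List.map_cons, List.filter_cons]
      by_cases h : PySem.Str.strip p = ""
      · have hstep : pvLoopBStep st p = st := by simp [pvLoopBStep, h]
        simp [h, hstep, ih]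
      · have hstep : pvLoopBStep st p = pvLoop2Step st (PySem.Str.strip p) := by
          cases hkm : pvKm (PySem.Str.lower (PySem.Str.strip p)) <;>
            simp [pvLoopBStep, pvLoop2Step, h, hkm]
        simp [h, hstep, ih]

-- characterization of A's first (dedup) loop: result = acc ++ dedup-by-key
def pvDD (K : PySem.Set String) : List String → List String
  | [] => []
  | t :: ts =>
      if PySem.Set.contains K (PySem.Str.lower t) then pvDD K ts
      else t :: pvDD (PySem.Set.add K (PySem.Str.lower t)) ts

theorem loop1_eq_pvDD (tokens : List String) (K : PySem.Set String) (acc : List String) :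
    (tokens.foldl pvLoop1Step (K, acc)).2 = acc ++ pvDD K tokens := by
  induction tokens generalizing K acc with
  | nil => simp [pvDD]
  | cons t ts ih =>
      simp only [List.foldl_cons]
      by_cases h : PySem.Str.lower t ∈ K
      · simp [pvLoop1Step, pvDD, h, ih]
      · simp [pvLoop1Step, pvDD, h, ih]

theorem loop1_eq_pvDD_nil (tokens : List String) (K : PySem.Set String) :
    (tokens.foldl pvLoop1Step (K, [])).2 = pvDD K tokens := by
  rw [loop1_eq_pvDD, List.nil_append]

-- the invariant: every mapped value of a key seen by the dedup loop is already in st's seen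
def pvInv (K : PySem.Set String) (st : PySem.Set String × List String) : Prop :=
  ∀ k m, k ∈ K → pvKm k = some m → m ∈ st.1

-- the dedup pass is redundant for the second loop
theorem loop2_pvDD (tokens : List String) (K : PySem.Set String)
    (st : PySem.Set String × List String) (hinv : pvInv K st) :
    (pvDD K tokens).foldl pvLoop2Step st = tokens.foldl pvLoop2Step st := by
  induction tokens generalizing K st with
  | nil => rfl
  | cons t ts ih =>
      simp only [pvDD, List.foldl_cons]
      by_cases h : PySem.Set.contains K (PySem.Str.lower t) = true
      · rw [if_pos h]
        have hk : PySem.Str.lower t ∈ K := (PySem.Set.contains_iff _ _).mp h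
        have hstep : pvLoop2Step st t = st := by
          cases hkm : pvKm (PySem.Str.lower t) with
          | none => exact pvLoop2Step_none st t hkm
          | some m =>
              rw [pvLoop2Step_some st t m hkm,
                if_pos ((PySem.Set.contains_iff _ _).mpr (hinv _ _ hk hkm))]
        rw [hstep, ih K st hinv]
      · rw [if_neg h]
        simp only [List.foldl_cons]
        apply ih
        intro k m hkmem hkm
        rw [PySem.Set.mem_add] at hkmem
        rcases hkmem with hkK | hkt
        · exact pvLoop2Step_seen_mono _ _ _ (hinv _ _ hkK hkm)
        · subst hkt
          exact pvLoop2Step_seen_self _ _ _ hkm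

-- pvDD of a nonempty list from the empty key-set is nonempty
theorem pvDD_empty_ne_nil (t : String) (ts : List String) :
    pvDD PySem.Set.empty (t :: ts) ≠ [] := by
  simp [pvDD, PySem.Set.empty, PySem.Set.contains]

-- pvInv holds trivially for the empty key-set
theorem pvInv_empty (st : PySem.Set String × List String) : pvInv PySem.Set.empty st := by
  intro k m hk _
  simp [PySem.Set.empty] at hk

-- ===== VERDICT (by name: the statement is the Claim_ definition above) =====
theorem parse_easyocr_langs_py_spec : Claim_equal_parse_easyocr_langs_py := by
  intro lang _
  unfold Spec_parse_easyocr_langs_py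
  simp only [parse_easyocr_langs_py, parse_easyocr_langs_py_alt, parse_ocr_lang_tokens]
  by_cases hraw : PySem.Str.strip (lang.getD "") = ""
  · rw [if_pos hraw, if_pos hraw, if_pos rfl]
  · simp only [if_neg hraw]
    rw [loopB_eq_loop2, loop1_eq_pvDD_nil, loop2_pvDD _ _ _ (pvInv_empty _)]
    cases htok : (((PySem.Str.split? (PySem.Str.replace (PySem.Str.replace
        (PySem.Str.strip (lang.getD "")) "+" ",") ";" ",") ",").getD []).map
        PySem.Str.strip).filter (fun t => t ≠ "") with
    | nil => simp [pvDD]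
    | cons t ts => rw [if_neg (pvDD_empty_ne_nil t ts)]
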